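-- pv_equiv track=rewrite | github.com/danialhamedi/CodeForce | R927Div3/thronsAndCoins.py | cut_array
-- ===== SOURCE A (Python) =====
-- def cut_array(input_array):
--     output_array = []
--     found_star = False
--
--     for item in input_array:
--         if item == "*":
--             if found_star:
--                 break
--             else:
--                 found_star = True
--         else:
--             output_array.append(item)
--             found_star = False
--
--     return output_array
-- ===== SOURCE B (Python) =====
-- def cut_array(input_array):
--     cut = len(input_array)
--     for i in range(1, len(input_array)):
--         if input_array[i] == "*" and input_array[i - 1] == "*":
--             cut = i
--             break
--     return [x for x in input_array[:cut] if x != "*"]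
-- ===== Notes on version B (the rewrite author's own statement) =====
-- stated objective: alternative
-- what changed: Replaces the stateful found_star/break loop with an index search for the first consecutive-star pair followed by a flat filter of the prefix before it.
import Mathlib
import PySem

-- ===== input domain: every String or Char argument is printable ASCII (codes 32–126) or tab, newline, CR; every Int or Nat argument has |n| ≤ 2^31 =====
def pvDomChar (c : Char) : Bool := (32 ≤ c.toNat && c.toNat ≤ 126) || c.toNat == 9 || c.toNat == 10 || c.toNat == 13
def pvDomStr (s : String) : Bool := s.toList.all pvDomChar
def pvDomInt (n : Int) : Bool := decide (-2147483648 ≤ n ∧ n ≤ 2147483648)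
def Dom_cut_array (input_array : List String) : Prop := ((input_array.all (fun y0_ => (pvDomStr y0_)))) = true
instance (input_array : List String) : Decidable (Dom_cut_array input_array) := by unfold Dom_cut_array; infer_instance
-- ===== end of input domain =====

-- B replaces A's stateful found_star/break loop by a boundary-index search plus a flat filter (alternative decomposition, same cost).


-- ===== PORT A =====
-- A's loop: state (output_array, found_star), break on second consecutive star.
def cutArrayAux : List String → List String → Bool → List String
  | [], out, _ => out
  | x :: xs, out, fs =>
    if x = "*" then
      if fs then out else cutArrayAux xs out true
    else
      cutArrayAux xs (out ++ [x]) false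

def cut_array (input_array : List String) : List String :=
  cutArrayAux input_array [] false

-- ===== PORT B =====
-- B's first pass: smallest i ≥ 1 with l[i-1] = l[i] = "*", default len(l).
def findCut : List String → Nat
  | [] => 0
  | [_] => 1
  | x :: y :: rest =>
    if x = "*" ∧ y = "*" then 1 else findCut (y :: rest) + 1

def cut_array_alt (input_array : List String) : List String :=
  (input_array.take (findCut input_array)).filter (fun x => x ≠ "*")

-- ===== PRECONDITION & SPEC =====
def Spec_cut_array (input_array : List String) (out : List String) : Prop := out = cut_array_alt input_array
instance (input_array : List String) (out : List String) : Decidable (Spec_cut_array input_array out) := by unfold Spec_cut_array; infer_instance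

-- ===== CLAIM (what is proved, stated in full; the proofs are below) =====
def Claim_equal_cut_array : Prop := ∀ (input_array : List String), Dom_cut_array input_array → Spec_cut_array input_array (cut_array input_array)

-- ===== LEMMAS AND PROOFS =====
theorem cutArrayAux_false (l : List String) :
    ∀ out, cutArrayAux l out false = out ++ (l.take (findCut l)).filter (fun x => x ≠ "*") := by
  induction l with
  | nil => intro out; simp [cutArrayAux, findCut]
  | cons x xs ih =>
    intro out
    by_cases hx : x = "*"
    · subst hx
      cases xs with
      | nil => simp [cutArrayAux, findCut]
      | cons y rest =>
        by_cases hy : y = "*"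
        · subst hy; simp [cutArrayAux, findCut]
        · have step : cutArrayAux ("*" :: y :: rest) out false
              = cutArrayAux (y :: rest) out false := by
            simp [cutArrayAux, hy]
          rw [step, ih]
          simp [findCut, hy]
    · cases xs with
      | nil => simp [cutArrayAux, findCut, hx]
      | cons y rest =>
        have step : cutArrayAux (x :: y :: rest) out false
            = cutArrayAux (y :: rest) (out ++ [x]) false := by
          simp [cutArrayAux, hx]
        rw [step, ih]
        simp [findCut, hx]

-- ===== VERDICT (by name: the statement is the Claim_ definition above) =====
theorem cut_array_spec : Claim_equal_cut_array := by
  intro l _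
  unfold Spec_cut_array cut_array cut_array_alt
  simpa using cutArrayAux_false l []
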